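-- pv_equiv track=rewrite | github.com/mechalas/hue-control | huectl/time.py | dayspec_to_list
-- ===== SOURCE A (Python) =====
-- def dayspec_to_list(spec):
-- 	days= list()
-- 	dayspec= int(spec)
-- 	if dayspec < 1 or dayspec > 0b1111111:
-- 		raise ValueError(dayspec)
--
-- 	for i in range(0,7):
-- 		if (0b1 << i) & dayspec:
-- 			days.append(i)
--
-- 	return days
-- ===== SOURCE B (Python) =====
-- def dayspec_to_list(spec):
-- 	dayspec = int(spec)
-- 	if dayspec < 1 or dayspec > 0b1111111:
-- 		raise ValueError(dayspec)
--
-- 	# Greedy decomposition into powers of two, highest first: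
-- 	# repeatedly strip the highest set bit, then reverse to ascending.
-- 	days = []
-- 	n = dayspec
-- 	while n:
-- 		i = n.bit_length() - 1
-- 		days.append(i)
-- 		n -= 1 << i
-- 	days.reverse()
-- 	return days
-- ===== Notes on version B (the rewrite author's own statement) =====
-- stated objective: alternative
-- what changed: B greedily decomposes the value itself into powers of two from the highest set bit down (bit_length, subtract, repeat), building the list high-to-low and reversing, instead of A's fixed scan masking each of the 7 positions in ascending order.
import Mathlib
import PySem

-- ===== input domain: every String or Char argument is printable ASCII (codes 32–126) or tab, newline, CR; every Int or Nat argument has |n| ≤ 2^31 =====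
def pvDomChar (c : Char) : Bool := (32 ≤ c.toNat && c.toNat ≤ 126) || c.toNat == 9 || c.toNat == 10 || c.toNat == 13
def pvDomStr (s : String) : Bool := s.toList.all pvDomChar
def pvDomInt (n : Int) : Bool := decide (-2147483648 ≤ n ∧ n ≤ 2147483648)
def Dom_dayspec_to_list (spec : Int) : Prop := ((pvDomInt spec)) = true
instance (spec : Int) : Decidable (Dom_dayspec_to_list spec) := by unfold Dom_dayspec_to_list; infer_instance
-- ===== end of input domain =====

-- B greedily strips the highest set bit of the value (bit_length, subtract) building high-to-low then reverses,
-- instead of A's fixed ascending scan over the 7 mask positions: an alternative decomposition, same cost.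
-- ===== PORT A =====
def dayspec_to_list (spec : Int) : List Int :=
  let dayspec := spec
  (PySem.List.pyRange 0 7 1).foldl
    (fun days i => if PySem.Int.band ((1 : Int) <<< i.toNat) dayspec ≠ 0 then days ++ [i] else days) []

-- ===== PORT B =====
-- the while loop of Source B: n.bit_length() - 1 for n ≥ 1 is Nat.log2 n; strip that power and recurse.
-- fuel = n is enough: n strictly decreases each step (totality guard only, not an algorithm switch)
def pvAltLoop (fuel : Nat) (n : Nat) : List Int :=
  match fuel with
  | 0 => []
  | fuel + 1 =>
    if n = 0 then []
    else
      let i := Nat.log2 n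
      ((i : Int) :: pvAltLoop fuel (n - 2 ^ i))

def dayspec_to_list_alt (spec : Int) : List Int :=
  let dayspec := spec
  (pvAltLoop dayspec.toNat dayspec.toNat).reverse

-- ===== PRECONDITION & SPEC =====
-- A raises ValueError for dayspec < 1 or dayspec > 127; Pre_ admits exactly the inputs on which A returns.
def Pre_dayspec_to_list (spec : Int) : Prop := 1 ≤ spec ∧ spec ≤ 127
instance (spec : Int) : Decidable (Pre_dayspec_to_list spec) := by unfold Pre_dayspec_to_list; infer_instance
def pvWitness_dayspec_to_list : Int := (42)

def Spec_dayspec_to_list (spec : Int) (out : List Int) : Prop := out = dayspec_to_list_alt spec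
instance (spec : Int) (out : List Int) : Decidable (Spec_dayspec_to_list spec out) := by unfold Spec_dayspec_to_list; infer_instance

-- ===== CLAIM (what is proved, stated in full; the proofs are below) =====
def Claim_equal_dayspec_to_list : Prop := ∀ (spec : Int), Dom_dayspec_to_list spec → Pre_dayspec_to_list spec → Spec_dayspec_to_list spec (dayspec_to_list spec)

-- ===== LEMMAS AND PROOFS =====

lemma dayspec_key : ∀ n : Fin 128, dayspec_to_list (n : Int) = dayspec_to_list_alt (n : Int) := by decide

-- ===== VERDICT =====
theorem dayspec_to_list_spec : Claim_equal_dayspec_to_list := by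
  intro spec _ hp
  unfold Spec_dayspec_to_list
  obtain ⟨h1, h2⟩ := hp
  have hs : spec = ((spec.toNat : Nat) : Int) := (Int.toNat_of_nonneg (by omega)).symm
  have hlt : spec.toNat < 128 := by omega
  rw [hs]
  exact dayspec_key ⟨spec.toNat, hlt⟩
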